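-- pv_equiv track=rewrite | github.com/Vaquum/Confab | confab/core.py | parse_mode
-- ===== SOURCE A (Python) =====
-- def parse_mode(prompt):
--     """Return (mode, clean_prompt). Default is 'chat' (Claude).
--     /doc → document editing mode
--     /consensus → multi-model synthesis
--     @grok / @gemini / @gpt → direct model routing
--     """
--     stripped = prompt.strip()
--     lower = stripped.lower()
--     if lower.startswith('/doc'):
--         return 'doc', stripped[len('/doc'):].strip()
--     if lower.startswith('/pr'):
--         return 'pr', stripped[len('/pr'):].strip()
--     if lower.startswith('/consensus'):
--         return 'consensus', stripped[len('/consensus'):].strip()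
--     for model in ('grok', 'gemini', 'gpt', 'claude'):
--         if lower.startswith(f'@{model}'):
--             return 'chat' if model == 'claude' else model, stripped[len(model) + 1:].strip()
--     return None, stripped  # no prefix — caller decides default
-- ===== SOURCE B (Python) =====
-- # Character-level state machine: a trie of command prefixes is built once; the
-- # prompt is scanned one character at a time through the trie (no startswith calls).
-- _COMMANDS = [('/doc', 'doc'), ('/pr', 'pr'), ('/consensus', 'consensus'),
--              ('@grok', 'grok'), ('@gemini', 'gemini'), ('@gpt', 'gpt'),
--              ('@claude', 'chat')]
--
-- _TRIE = {}
-- for _prefix, _mode in _COMMANDS: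
--     _node = _TRIE
--     for _ch in _prefix:
--         _node = _node.setdefault(_ch, {})
--     _node[''] = _mode
--
--
-- def parse_mode(prompt):
--     stripped = prompt.strip()
--     lower = stripped.lower()
--     node = _TRIE
--     for i, ch in enumerate(lower):
--         node = node.get(ch)
--         if node is None:
--             break
--         if '' in node:
--             return node[''], stripped[i + 1:].strip()
--     return None, stripped
-- ===== Notes on version B (the rewrite author's own statement) =====
-- stated objective: alternative
-- what changed: Replaced the if-ladder of startswith tests plus the @model loop by a character-level state machine: a prefix trie built once from the (prefix, mode) pairs, walked one character at a time over the lowered prompt; correct because no command prefix is a prefix of another, so the unique trie match equals A's first startswith match.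
import Mathlib
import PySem

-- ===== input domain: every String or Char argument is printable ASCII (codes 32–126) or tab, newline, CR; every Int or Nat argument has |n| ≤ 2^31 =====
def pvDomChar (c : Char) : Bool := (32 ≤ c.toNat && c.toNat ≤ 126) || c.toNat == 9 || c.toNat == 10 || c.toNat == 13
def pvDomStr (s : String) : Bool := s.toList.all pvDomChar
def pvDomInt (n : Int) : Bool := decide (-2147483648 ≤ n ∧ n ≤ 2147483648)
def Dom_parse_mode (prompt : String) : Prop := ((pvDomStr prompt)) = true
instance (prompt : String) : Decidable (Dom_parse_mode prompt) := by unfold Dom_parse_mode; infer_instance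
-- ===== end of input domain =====

-- B replaces A's startswith if-ladder + @model loop by a character-level state machine:
-- a prefix trie of the commands, built once and walked one character at a time (alternative, same cost).

-- ===== PORT A =====
-- the for-loop over ('grok','gemini','gpt','claude')
def pmLoopA (stripped lower : String) : List String → Option String × String
  | [] => (none, stripped)
  | m :: rest =>
    if PySem.Str.startswith lower ("@" ++ m) then
      ((if m == "claude" then some "chat" else some m),
       PySem.Str.strip (PySem.Str.slice stripped (some ((PySem.Str.len m : Int) + 1)) none))
    else pmLoopA stripped lower rest

def parse_mode (prompt : String) : Option String × String :=
  let stripped := PySem.Str.strip prompt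
  let lower := PySem.Str.lower stripped
  if PySem.Str.startswith lower "/doc" then
    (some "doc", PySem.Str.strip (PySem.Str.slice stripped (some (PySem.Str.len "/doc" : Int)) none))
  else if PySem.Str.startswith lower "/pr" then
    (some "pr", PySem.Str.strip (PySem.Str.slice stripped (some (PySem.Str.len "/pr" : Int)) none))
  else if PySem.Str.startswith lower "/consensus" then
    (some "consensus", PySem.Str.strip (PySem.Str.slice stripped (some (PySem.Str.len "/consensus" : Int)) none))
  else pmLoopA stripped lower ["grok", "gemini", "gpt", "claude"]

-- ===== PORT B =====
-- Python's nested command-trie dicts: a mutual pair instead of a nested inductive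
mutual
inductive PmTrie where
  | mk : Option String → PmTrieL → PmTrie
inductive PmTrieL where
  | nil : PmTrieL
  | cons : Char → PmTrie → PmTrieL → PmTrieL
end

def pmCommands : List (String × String) :=
  [("/doc", "doc"), ("/pr", "pr"), ("/consensus", "consensus"),
   ("@grok", "grok"), ("@gemini", "gemini"), ("@gpt", "gpt"), ("@claude", "chat")]

-- node.setdefault(ch, {}) with the recursive descent applied to the child found/created
def pmChildIns (f : PmTrie → PmTrie) (c : Char) : PmTrieL → PmTrieL
  | .nil => .cons c (f (.mk none .nil)) .nil
  | .cons c' t rest => if c' = c then .cons c' (f t) rest else .cons c' t (pmChildIns f c rest)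

-- insert one prefix, then node[''] = mode at its end
def pmInsert : List Char → String → PmTrie → PmTrie
  | [], mode, .mk _ ch => .mk (some mode) ch
  | c :: cs, mode, .mk m ch => .mk m (pmChildIns (pmInsert cs mode) c ch)

-- the module-level trie-building loop
def pmTrie : PmTrie :=
  pmCommands.foldl (fun t pm => pmInsert pm.1.toList pm.2 t) (.mk none .nil)

-- node.get(ch)
def pmGet (c : Char) : PmTrieL → Option PmTrie
  | .nil => none
  | .cons c' t rest => if c' = c then some t else pmGet c rest

-- the "for i, ch in enumerate(lower)" loop
def pmWalk (stripped : String) : Nat → PmTrie → List Char → Option String × String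
  | _, _, [] => (none, stripped)
  | i, .mk _ children, c :: cs =>
    match pmGet c children with
    | none => (none, stripped)
    | some n =>
      match n with
      | .mk (some mode) _ =>
          (some mode, PySem.Str.strip (PySem.Str.slice stripped (some ((i : Int) + 1)) none))
      | .mk none _ => pmWalk stripped (i + 1) n cs

def parse_mode_alt (prompt : String) : Option String × String :=
  let stripped := PySem.Str.strip prompt
  let lower := PySem.Str.lower stripped
  pmWalk stripped 0 pmTrie lower.toList

-- ===== PRECONDITION & SPEC =====
def Spec_parse_mode (prompt : String) (out : Option String × String) : Prop := out = parse_mode_alt prompt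
instance (prompt : String) (out : Option String × String) : Decidable (Spec_parse_mode prompt out) := by unfold Spec_parse_mode; infer_instance

-- ===== CLAIM (what is proved, stated in full; the proofs are below) =====
def Claim_equal_parse_mode : Prop := ∀ (prompt : String), Dom_parse_mode prompt → Spec_parse_mode prompt (parse_mode prompt)

-- ===== LEMMAS AND PROOFS =====

-- the fully built trie, as a literal
theorem pmTrie_def : pmTrie = (.mk none (.cons '/' (.mk none (.cons 'd' (.mk none (.cons 'o' (.mk none (.cons 'c' (.mk (some "doc") .nil) .nil)) .nil)) (.cons 'p' (.mk none (.cons 'r' (.mk (some "pr") .nil) .nil)) (.cons 'c' (.mk none (.cons 'o' (.mk none (.cons 'n' (.mk none (.cons 's' (.mk none (.cons 'e' (.mk none (.cons 'n' (.mk none (.cons 's' (.mk none (.cons 'u' (.mk none (.cons 's' (.mk (some "consensus") .nil) .nil)) .nil)) .nil)) .nil)) .nil)) .nil)) .nil)) .nil)) .nil)))) (.cons '@' (.mk none (.cons 'g' (.mk none (.cons 'r' (.mk none (.cons 'o' (.mk none (.cons 'k' (.mk (some "grok") .nil) .nil)) .nil)) (.cons 'e' (.mk none (.cons 'm' (.mk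 none (.cons 'i' (.mk none (.cons 'n' (.mk none (.cons 'i' (.mk (some "gemini") .nil) .nil)) .nil)) .nil)) .nil)) (.cons 'p' (.mk none (.cons 't' (.mk (some "gpt") .nil) .nil)) .nil)))) (.cons 'c' (.mk none (.cons 'l' (.mk none (.cons 'a' (.mk none (.cons 'u' (.mk none (.cons 'd' (.mk none (.cons 'e' (.mk (some "chat") .nil) .nil)) .nil)) .nil)) .nil)) .nil)) .nil))) .nil))) := by rfl

-- A's dispatch ladder equals the trie walk, for ANY pair of strings in the
-- (stripped, lower) positions: proved by walking the trie, case-splitting on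
-- the characters of `lo` exactly at the trie's branch points.
set_option maxHeartbeats 1000000 in
theorem pm_key (s lo : String) :
    (if PySem.Str.startswith lo "/doc" then
      (some "doc", PySem.Str.strip (PySem.Str.slice s (some (PySem.Str.len "/doc" : Int)) none))
    else if PySem.Str.startswith lo "/pr" then
      (some "pr", PySem.Str.strip (PySem.Str.slice s (some (PySem.Str.len "/pr" : Int)) none))
    else if PySem.Str.startswith lo "/consensus" then
      (some "consensus", PySem.Str.strip (PySem.Str.slice s (some (PySem.Str.len "/consensus" : Int)) none))
    else pmLoopA s lo ["grok", "gemini", "gpt", "claude"]) =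
    pmWalk s 0 pmTrie lo.toList := by
  have e1 : ("@" ++ "grok" : String) = "@grok" := rfl
  have e2 : ("@" ++ "gemini" : String) = "@gemini" := rfl
  have e3 : ("@" ++ "gpt" : String) = "@gpt" := rfl
  have e4 : ("@" ++ "claude" : String) = "@claude" := rfl
  simp only [pmLoopA, e1, e2, e3, e4, PySem.Str.startswith_eq, PySem.Chars.startswith,
    show ("/doc":String).toList = ['/','d','o','c'] from rfl,
    show ("/pr":String).toList = ['/','p','r'] from rfl,
    show ("/consensus":String).toList = ['/','c','o','n','s','e','n','s','u','s'] from rfl,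
    show ("@grok":String).toList = ['@','g','r','o','k'] from rfl,
    show ("@gemini":String).toList = ['@','g','e','m','i','n','i'] from rfl,
    show ("@gpt":String).toList = ['@','g','p','t'] from rfl,
    show ("@claude":String).toList = ['@','c','l','a','u','d','e'] from rfl,
    pmTrie_def]
  generalize lo.toList = l0
  rcases l0 with _ | ⟨c0, l1⟩
  · simp_all [pmWalk, pmGet, List.isPrefixOf, PySem.Str.len]
  · 
    by_cases h0_0 : '/' = c0
    · subst h0_0
      rcases l1 with _ | ⟨c1, l2⟩
      · simp_all [pmWalk, pmGet, List.isPrefixOf, PySem.Str.len]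
      · 
        by_cases h1_0 : 'd' = c1
        · subst h1_0
          rcases l2 with _ | ⟨c2, l3⟩
          · simp_all [pmWalk, pmGet, List.isPrefixOf, PySem.Str.len]
          · 
            by_cases h2_0 : 'o' = c2
            · subst h2_0
              rcases l3 with _ | ⟨c3, l4⟩
              · simp_all [pmWalk, pmGet, List.isPrefixOf, PySem.Str.len]
              · 
                by_cases h3_0 : 'c' = c3
                · subst h3_0
                  simp_all [pmWalk, pmGet, List.isPrefixOf, PySem.Str.len]
                · 
                  simp_all [pmWalk, pmGet, List.isPrefixOf, PySem.Str.len]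
            · 
              simp_all [pmWalk, pmGet, List.isPrefixOf, PySem.Str.len]
        · 
          by_cases h1_1 : 'p' = c1
          · subst h1_1
            rcases l2 with _ | ⟨c2, l3⟩
            · simp_all [pmWalk, pmGet, List.isPrefixOf, PySem.Str.len]
            · 
              by_cases h2_0 : 'r' = c2
              · subst h2_0
                simp_all [pmWalk, pmGet, List.isPrefixOf, PySem.Str.len]
              · 
                simp_all [pmWalk, pmGet, List.isPrefixOf, PySem.Str.len]
          · 
            by_cases h1_2 : 'c' = c1
            · subst h1_2
              rcases l2 with _ | ⟨c2, l3⟩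
              · simp_all [pmWalk, pmGet, List.isPrefixOf, PySem.Str.len]
              · 
                by_cases h2_0 : 'o' = c2
                · subst h2_0
                  rcases l3 with _ | ⟨c3, l4⟩
                  · simp_all [pmWalk, pmGet, List.isPrefixOf, PySem.Str.len]
                  · 
                    by_cases h3_0 : 'n' = c3
                    · subst h3_0
                      rcases l4 with _ | ⟨c4, l5⟩
                      · simp_all [pmWalk, pmGet, List.isPrefixOf, PySem.Str.len]
                      · 
                        by_cases h4_0 : 's' = c4
                        · subst h4_0
                          rcases l5 with _ | ⟨c5, l6⟩
                          · simp_all [pmWalk, pmGet, List.isPrefixOf, PySem.Str.len]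
                          · 
                            by_cases h5_0 : 'e' = c5
                            · subst h5_0
                              rcases l6 with _ | ⟨c6, l7⟩
                              · simp_all [pmWalk, pmGet, List.isPrefixOf, PySem.Str.len]
                              · 
                                by_cases h6_0 : 'n' = c6
                                · subst h6_0
                                  rcases l7 with _ | ⟨c7, l8⟩
                                  · simp_all [pmWalk, pmGet, List.isPrefixOf, PySem.Str.len]
                                  · 
                                    by_cases h7_0 : 's' = c7
                                    · subst h7_0
                                      rcases l8 with _ | ⟨c8, l9⟩
                                      · simp_all [pmWalk, pmGet, List.isPrefixOf, PySem.Str.len]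
                                      · 
                                        by_cases h8_0 : 'u' = c8
                                        · subst h8_0
                                          rcases l9 with _ | ⟨c9, l10⟩
                                          · simp_all [pmWalk, pmGet, List.isPrefixOf, PySem.Str.len]
                                          · 
                                            by_cases h9_0 : 's' = c9
                                            · subst h9_0
                                              simp_all [pmWalk, pmGet, List.isPrefixOf, PySem.Str.len]
                                            · 
                                              simp_all [pmWalk, pmGet, List.isPrefixOf, PySem.Str.len]
                                        · 
                                          simp_all [pmWalk, pmGet, List.isPrefixOf, PySem.Str.len]
                                    · 
                                      simp_all [pmWalk, pmGet, List.isPrefixOf, PySem.Str.len]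
                                · 
                                  simp_all [pmWalk, pmGet, List.isPrefixOf, PySem.Str.len]
                            · 
                              simp_all [pmWalk, pmGet, List.isPrefixOf, PySem.Str.len]
                        · 
                          simp_all [pmWalk, pmGet, List.isPrefixOf, PySem.Str.len]
                    · 
                      simp_all [pmWalk, pmGet, List.isPrefixOf, PySem.Str.len]
                · 
                  simp_all [pmWalk, pmGet, List.isPrefixOf, PySem.Str.len]
            · 
              simp_all [pmWalk, pmGet, List.isPrefixOf, PySem.Str.len]
    · 
      by_cases h0_1 : '@' = c0
      · subst h0_1
        rcases l1 with _ | ⟨c1, l2⟩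
        · simp_all [pmWalk, pmGet, List.isPrefixOf, PySem.Str.len]
        · 
          by_cases h1_0 : 'g' = c1
          · subst h1_0
            rcases l2 with _ | ⟨c2, l3⟩
            · simp_all [pmWalk, pmGet, List.isPrefixOf, PySem.Str.len]
            · 
              by_cases h2_0 : 'r' = c2
              · subst h2_0
                rcases l3 with _ | ⟨c3, l4⟩
                · simp_all [pmWalk, pmGet, List.isPrefixOf, PySem.Str.len]
                · 
                  by_cases h3_0 : 'o' = c3
                  · subst h3_0
                    rcases l4 with _ | ⟨c4, l5⟩
                    · simp_all [pmWalk, pmGet, List.isPrefixOf, PySem.Str.len]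
                    · 
                      by_cases h4_0 : 'k' = c4
                      · subst h4_0
                        simp_all [pmWalk, pmGet, List.isPrefixOf, PySem.Str.len]
                      · 
                        simp_all [pmWalk, pmGet, List.isPrefixOf, PySem.Str.len]
                  · 
                    simp_all [pmWalk, pmGet, List.isPrefixOf, PySem.Str.len]
              · 
                by_cases h2_1 : 'e' = c2
                · subst h2_1
                  rcases l3 with _ | ⟨c3, l4⟩
                  · simp_all [pmWalk, pmGet, List.isPrefixOf, PySem.Str.len]
                  · 
                    by_cases h3_0 : 'm' = c3
                    · subst h3_0
                      rcases l4 with _ | ⟨c4, l5⟩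
                      · simp_all [pmWalk, pmGet, List.isPrefixOf, PySem.Str.len]
                      · 
                        by_cases h4_0 : 'i' = c4
                        · subst h4_0
                          rcases l5 with _ | ⟨c5, l6⟩
                          · simp_all [pmWalk, pmGet, List.isPrefixOf, PySem.Str.len]
                          · 
                            by_cases h5_0 : 'n' = c5
                            · subst h5_0
                              rcases l6 with _ | ⟨c6, l7⟩
                              · simp_all [pmWalk, pmGet, List.isPrefixOf, PySem.Str.len]
                              · 
                                by_cases h6_0 : 'i' = c6
                                · subst h6_0
                                  simp_all [pmWalk, pmGet, List.isPrefixOf, PySem.Str.len]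
                                · 
                                  simp_all [pmWalk, pmGet, List.isPrefixOf, PySem.Str.len]
                            · 
                              simp_all [pmWalk, pmGet, List.isPrefixOf, PySem.Str.len]
                        · 
                          simp_all [pmWalk, pmGet, List.isPrefixOf, PySem.Str.len]
                    · 
                      simp_all [pmWalk, pmGet, List.isPrefixOf, PySem.Str.len]
                · 
                  by_cases h2_2 : 'p' = c2
                  · subst h2_2
                    rcases l3 with _ | ⟨c3, l4⟩
                    · simp_all [pmWalk, pmGet, List.isPrefixOf, PySem.Str.len]
                    · 
                      by_cases h3_0 : 't' = c3
                      · subst h3_0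
                        simp_all [pmWalk, pmGet, List.isPrefixOf, PySem.Str.len]
                      · 
                        simp_all [pmWalk, pmGet, List.isPrefixOf, PySem.Str.len]
                  · 
                    simp_all [pmWalk, pmGet, List.isPrefixOf, PySem.Str.len]
          · 
            by_cases h1_1 : 'c' = c1
            · subst h1_1
              rcases l2 with _ | ⟨c2, l3⟩
              · simp_all [pmWalk, pmGet, List.isPrefixOf, PySem.Str.len]
              · 
                by_cases h2_0 : 'l' = c2
                · subst h2_0
                  rcases l3 with _ | ⟨c3, l4⟩
                  · simp_all [pmWalk, pmGet, List.isPrefixOf, PySem.Str.len]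
                  · 
                    by_cases h3_0 : 'a' = c3
                    · subst h3_0
                      rcases l4 with _ | ⟨c4, l5⟩
                      · simp_all [pmWalk, pmGet, List.isPrefixOf, PySem.Str.len]
                      · 
                        by_cases h4_0 : 'u' = c4
                        · subst h4_0
                          rcases l5 with _ | ⟨c5, l6⟩
                          · simp_all [pmWalk, pmGet, List.isPrefixOf, PySem.Str.len]
                          · 
                            by_cases h5_0 : 'd' = c5
                            · subst h5_0
                              rcases l6 with _ | ⟨c6, l7⟩
                              · simp_all [pmWalk, pmGet, List.isPrefixOf, PySem.Str.len]
                              · 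
                                by_cases h6_0 : 'e' = c6
                                · subst h6_0
                                  simp_all [pmWalk, pmGet, List.isPrefixOf, PySem.Str.len]
                                · 
                                  simp_all [pmWalk, pmGet, List.isPrefixOf, PySem.Str.len]
                            · 
                              simp_all [pmWalk, pmGet, List.isPrefixOf, PySem.Str.len]
                        · 
                          simp_all [pmWalk, pmGet, List.isPrefixOf, PySem.Str.len]
                    · 
                      simp_all [pmWalk, pmGet, List.isPrefixOf, PySem.Str.len]
                · 
                  simp_all [pmWalk, pmGet, List.isPrefixOf, PySem.Str.len]
            · 
              simp_all [pmWalk, pmGet, List.isPrefixOf, PySem.Str.len]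
      · 
        simp_all [pmWalk, pmGet, List.isPrefixOf, PySem.Str.len]

-- ===== VERDICT (by name: the statement is the Claim_ definition above) =====
theorem parse_mode_spec : Claim_equal_parse_mode := by
  intro prompt _
  unfold Spec_parse_mode parse_mode parse_mode_alt
  exact pm_key _ _
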